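-- pv_equiv track=rewrite | github.com/matko-k/aoc_2023 | day_10/puzzle_10.py | find_enclosed_tiles
-- ===== SOURCE A (Python) =====
-- def check_crosses_to_the_right(loop_points, start, row):
--     crosses = {'|': 0, 'L': 0, 'J': 0, '7': 0, 'F': 0}
--     for i in range(start[0] + 1, len(row)):
--         if (i, start[1]) in loop_points:
--             if row[i] in crosses.keys():
--                 crosses[row[i]] += 1
--
--     full_crosses = crosses['|'] + min(crosses['L'], crosses['7']) + min(crosses['F'], crosses['J'])
--
--     return full_crosses
--
-- def find_enclosed_tiles(loop_points, pipeline):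
--     tiles = 0
--     for i in range(len(pipeline)):
--         for j in range(len(pipeline[i])):
--             if (j, i) in loop_points:
--                 continue
--             crosses = check_crosses_to_the_right(loop_points, (j, i), pipeline[i])
--             tiles += crosses % 2
--
--     return tiles
-- ===== SOURCE B (Python) =====
-- def find_enclosed_tiles(loop_points, pipeline):
--     lp = set(loop_points)
--     tiles = 0
--     for y, row in enumerate(pipeline):
--         # one right-to-left pass per row: maintain suffix counts of the five
--         # crossing symbols at loop positions, so each cell's parity is O(1)
--         v = l = jj = s7 = f = 0
--         t = 0
--         for k in range(len(row) - 1, -1, -1):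
--             if (k, y) in lp:
--                 c = row[k]
--                 if c == '|': v += 1
--                 elif c == 'L': l += 1
--                 elif c == 'J': jj += 1
--                 elif c == '7': s7 += 1
--                 elif c == 'F': f += 1
--             else:
--                 t += (v + min(l, s7) + min(f, jj)) % 2
--         tiles += t
--     return tiles
-- ===== Notes on version B (the rewrite author's own statement) =====
-- stated objective: faster
-- what changed: Instead of rescanning the rest of the row for every cell (a dict-counting pass per cell), B makes one right-to-left pass per row maintaining suffix counts of the five crossing symbols at loop positions, so each cell's crossing parity is computed in O(1).
import Mathlib
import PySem

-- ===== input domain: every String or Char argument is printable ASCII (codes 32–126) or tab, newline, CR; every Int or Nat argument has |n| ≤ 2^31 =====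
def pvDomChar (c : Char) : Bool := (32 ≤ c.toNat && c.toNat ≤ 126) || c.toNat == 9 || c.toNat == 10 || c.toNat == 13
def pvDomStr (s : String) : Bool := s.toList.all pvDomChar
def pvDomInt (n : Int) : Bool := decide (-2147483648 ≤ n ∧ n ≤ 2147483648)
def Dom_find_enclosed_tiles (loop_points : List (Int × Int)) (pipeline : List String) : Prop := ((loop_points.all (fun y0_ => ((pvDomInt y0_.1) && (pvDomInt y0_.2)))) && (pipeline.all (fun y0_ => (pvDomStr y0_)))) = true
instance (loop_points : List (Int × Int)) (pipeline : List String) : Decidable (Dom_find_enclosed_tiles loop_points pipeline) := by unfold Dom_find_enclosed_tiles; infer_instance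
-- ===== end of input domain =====

-- B replaces A's per-cell rescan of the rest of the row by one right-to-left pass per row
-- that maintains suffix counts of the five crossing symbols (objective: faster).

-- ===== PORT A =====
def check_crosses_to_the_right (loop_points : List (Int × Int)) (start : Int × Int) (row : String) : Int :=
  let crosses : PySem.Dict Char Int :=
    PySem.Dict.ofList [('|', 0), ('L', 0), ('J', 0), ('7', 0), ('F', 0)]
  let crosses := (PySem.List.pyRange (start.1 + 1) (PySem.Str.len row) 1).foldl
    (fun crosses i =>
      if (i, start.2) ∈ loop_points then
        match PySem.Str.pyGet? row i with
        | some c => if crosses.contains c then crosses.modify c 0 (· + 1) else crosses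
        | none => crosses   -- unreachable: i ranges over valid indices of row
      else crosses) crosses
  crosses.getD '|' 0 + min (crosses.getD 'L' 0) (crosses.getD '7' 0)
    + min (crosses.getD 'F' 0) (crosses.getD 'J' 0)

def find_enclosed_tiles (loop_points : List (Int × Int)) (pipeline : List String) : Int :=
  (PySem.List.pyRange 0 ((pipeline.length : Int)) 1).foldl (fun tiles i =>
    let row := PySem.List.pyGetD pipeline i ""   -- i ranges over valid indices of pipeline
    (PySem.List.pyRange 0 (PySem.Str.len row) 1).foldl (fun tiles j =>
      if (j, i) ∈ loop_points then tiles
      else tiles + PySem.Int.mod (check_crosses_to_the_right loop_points (j, i) row) 2) tiles) 0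

-- ===== PORT B =====
-- counter tuple (v, l, jj, s7, f) = counts of '|', 'L', 'J', '7', 'F'
def pvBump (s : Int × Int × Int × Int × Int) (c : Char) : Int × Int × Int × Int × Int :=
  match s with
  | (v, l, jj, s7, f) =>
    if c = '|' then (v + 1, l, jj, s7, f)
    else if c = 'L' then (v, l + 1, jj, s7, f)
    else if c = 'J' then (v, l, jj + 1, s7, f)
    else if c = '7' then (v, l, jj, s7 + 1, f)
    else if c = 'F' then (v, l, jj, s7, f + 1)
    else (v, l, jj, s7, f)

-- the reverse loop of Source B: walking cs (the row suffix starting at column k) from the right,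
-- returning the suffix symbol counts and the accumulated enclosed-tile count t
def pvRowScan (lp : List (Int × Int)) (y : Int) (k : Int) (cs : List Char) :
    (Int × Int × Int × Int × Int) × Int :=
  match cs with
  | [] => ((0, 0, 0, 0, 0), 0)
  | c :: rest =>
    match pvRowScan lp y (k + 1) rest with
    | ((v, l, jj, s7, f), t) =>
      if (k, y) ∈ lp then (pvBump (v, l, jj, s7, f) c, t)
      else ((v, l, jj, s7, f), t + PySem.Int.mod (v + min l s7 + min f jj) 2)

def find_enclosed_tiles_alt (loop_points : List (Int × Int)) (pipeline : List String) : Int :=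
  (PySem.List.enumerate pipeline 0).foldl
    (fun tiles p => tiles + (pvRowScan loop_points p.1 0 p.2.toList).2) 0

-- ===== PRECONDITION & SPEC =====
def Spec_find_enclosed_tiles (loop_points : List (Int × Int)) (pipeline : List String) (out : Int) : Prop := out = find_enclosed_tiles_alt loop_points pipeline
instance (loop_points : List (Int × Int)) (pipeline : List String) (out : Int) : Decidable (Spec_find_enclosed_tiles loop_points pipeline out) := by unfold Spec_find_enclosed_tiles; infer_instance

-- ===== CLAIM (what is proved, stated in full; the proofs are below) =====
def Claim_equal_find_enclosed_tiles : Prop := ∀ (loop_points : List (Int × Int)) (pipeline : List String), Dom_find_enclosed_tiles loop_points pipeline → Spec_find_enclosed_tiles loop_points pipeline (find_enclosed_tiles loop_points pipeline)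

-- ===== LEMMAS AND PROOFS =====

-- proof-side tuple mirror of A's dict-updating loop body
def pvTStep (lp : List (Int × Int)) (y : Int) (row : String)
    (s : Int × Int × Int × Int × Int) (i : Int) : Int × Int × Int × Int × Int :=
  if (i, y) ∈ lp then
    match PySem.Str.pyGet? row i with
    | some c => pvBump s c
    | none => s
  else s

def pvAdd (a b : Int × Int × Int × Int × Int) : Int × Int × Int × Int × Int :=
  (a.1 + b.1, a.2.1 + b.2.1, a.2.2.1 + b.2.2.1, a.2.2.2.1 + b.2.2.2.1, a.2.2.2.2 + b.2.2.2.2)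

-- simulation relation between A's dict and the tuple of its five counters
def pvR (d : PySem.Dict Char Int) (s : Int × Int × Int × Int × Int) : Prop :=
  (d.getD '|' 0, d.getD 'L' 0, d.getD 'J' 0, d.getD '7' 0, d.getD 'F' 0) = s ∧
    d.keys = ['|', 'L', 'J', '7', 'F']

theorem pvR_step (lp : List (Int × Int)) (y : Int) (row : String)
    (d : PySem.Dict Char Int) (s : Int × Int × Int × Int × Int) (i : Int) (h : pvR d s) :
    pvR (if (i, y) ∈ lp then
          match PySem.Str.pyGet? row i with
          | some c => if d.contains c then d.modify c 0 (· + 1) else d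
          | none => d
        else d) (pvTStep lp y row s i) := by
  obtain ⟨hv, hk⟩ := h
  unfold pvTStep
  by_cases hm : (i, y) ∈ lp
  · simp only [hm, if_true]
    rcases hg : PySem.Str.pyGet? row i with _ | c
    · exact ⟨hv, hk⟩
    · have hcont : d.contains c = decide (c ∈ (['|', 'L', 'J', '7', 'F'] : List Char)) := by
        rw [PySem.Dict.contains_eq_decide_mem_keys, hk]
      by_cases hc : c ∈ (['|', 'L', 'J', '7', 'F'] : List Char)
      · simp only [hcont, hc, decide_true, if_true]
        obtain ⟨v, l, jj, s7, f⟩ := s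
        simp only [Prod.mk.injEq] at hv
        obtain ⟨h1, h2, h3, h4, h5⟩ := hv
        have hct : d.contains c = true := by rw [hcont]; simp [hc]
        refine ⟨?_, by simp [PySem.Dict.keys_insert_of_contains, hct, hk]⟩
        simp only [List.mem_cons, List.not_mem_nil, or_false] at hc
        rcases hc with rfl | rfl | rfl | rfl | rfl
        all_goals simp [PySem.Dict.getD_modify, pvBump, h1, h2, h3, h4, h5]
      · simp only [hcont, hc, decide_false]
        obtain ⟨v, l, jj, s7, f⟩ := s
        have : pvBump (v, l, jj, s7, f) c = (v, l, jj, s7, f) := by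
          simp only [List.mem_cons, not_or] at hc
          simp [pvBump, hc.1, hc.2.1, hc.2.2.1, hc.2.2.2.1, hc.2.2.2.2]
        rw [this]; exact ⟨hv, hk⟩
  · simp only [hm, if_false]; exact ⟨hv, hk⟩

theorem pvR_foldl (lp : List (Int × Int)) (y : Int) (row : String)
    (is : List Int) (d : PySem.Dict Char Int) (s : Int × Int × Int × Int × Int) (h : pvR d s) :
    pvR (is.foldl (fun d i =>
          if (i, y) ∈ lp then
            match PySem.Str.pyGet? row i with
            | some c => if d.contains c then d.modify c 0 (· + 1) else d
            | none => d
          else d) d)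
        (is.foldl (pvTStep lp y row) s) := by
  induction is generalizing d s with
  | nil => exact h
  | cons i is ih => exact ih _ _ (pvR_step lp y row d s i h)

theorem pvAdd_bump (s r : Int × Int × Int × Int × Int) (c : Char) :
    pvAdd (pvBump s c) r = pvAdd s (pvBump r c) := by
  obtain ⟨v, l, jj, s7, f⟩ := s; obtain ⟨v', l', jj', s7', f'⟩ := r
  simp only [pvBump, pvAdd]; split_ifs <;> simp <;> ring

theorem pvAdd_zero_left (r : Int × Int × Int × Int × Int) : pvAdd (0, 0, 0, 0, 0) r = r := by
  obtain ⟨v, l, jj, s7, f⟩ := r; simp [pvAdd]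

theorem pvAdd_zero_right (s : Int × Int × Int × Int × Int) : pvAdd s (0, 0, 0, 0, 0) = s := by
  obtain ⟨v, l, jj, s7, f⟩ := s; simp [pvAdd]

-- A's counting loop from column k (tuple form) computes the suffix counts of pvRowScan
theorem pvTFold_eq (lp : List (Int × Int)) (y : Int) (row : String) :
    ∀ (cs : List Char) (k : Nat), row.toList.drop k = cs →
    ∀ (s : Int × Int × Int × Int × Int),
    (PySem.List.pyRange (k : Int) (PySem.Str.len row) 1).foldl (pvTStep lp y row) s
      = pvAdd s (pvRowScan lp y (k : Int) cs).1 := by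
  intro cs
  induction cs with
  | nil =>
    intro k hk s
    have hlen : row.toList.length ≤ k := List.drop_eq_nil_iff.mp hk
    have hlen2 : row.length ≤ k := by simpa using hlen
    rw [PySem.List.pyRange_one_eq_nil (by simp [PySem.Str.len_eq]; omega)]
    simp [pvRowScan, pvAdd_zero_right]
  | cons c rest ih =>
    intro k hk s
    have hklt : k < row.toList.length := by
      by_contra hge
      rw [List.drop_eq_nil_of_le (by omega)] at hk; cases hk
    have hklt2 : k < row.length := by simpa using hklt
    have hget : row.toList[k]? = some c := by
      have h0 : (row.toList.drop k)[0]? = some c := by rw [hk]; rfl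
      rw [List.getElem?_drop] at h0; simpa using h0
    have hrest : row.toList.drop (k + 1) = rest := by
      have h1 : (row.toList.drop k).tail = row.toList.drop (k + 1) := by
        rw [← List.drop_drop]; simp
      rw [← h1, hk]; rfl
    rw [PySem.List.pyRange_one_cons (by simp [PySem.Str.len_eq]; omega)]
    rw [List.foldl_cons]
    have hstep : pvTStep lp y row s (k : Int)
        = if ((k : Int), y) ∈ lp then pvBump s c else s := by
      unfold pvTStep
      rw [show PySem.Str.pyGet? row (k : Int) = some c by
        rw [PySem.Str.pyGet?_natCast, hget]]
    rw [hstep]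
    have hcast : ((k : Int) + 1) = ((k + 1 : Nat) : Int) := by push_cast; ring
    rw [hcast, ih (k + 1) hrest]
    rcases hrs : pvRowScan lp y ((k + 1 : Nat) : Int) rest with ⟨⟨v, l, jj, s7, f⟩, t⟩
    simp only [pvRowScan, hcast, hrs]
    by_cases hm : ((k : Int), y) ∈ lp
    · simp only [hm, if_true]
      exact pvAdd_bump s (v, l, jj, s7, f) c
    · simp only [hm, if_false]

theorem check_spec (lp : List (Int × Int)) (y : Int) (row : String) (k : Nat) :
    check_crosses_to_the_right lp ((k : Int), y) row
      = (pvRowScan lp y ((k : Int) + 1) (row.toList.drop (k + 1))).1.1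
        + min (pvRowScan lp y ((k : Int) + 1) (row.toList.drop (k + 1))).1.2.1
            (pvRowScan lp y ((k : Int) + 1) (row.toList.drop (k + 1))).1.2.2.2.1
        + min (pvRowScan lp y ((k : Int) + 1) (row.toList.drop (k + 1))).1.2.2.2.2
            (pvRowScan lp y ((k : Int) + 1) (row.toList.drop (k + 1))).1.2.2.1 := by
  unfold check_crosses_to_the_right
  have h0 : pvR (PySem.Dict.ofList [('|', 0), ('L', 0), ('J', 0), ('7', 0), ('F', 0)])
      (0, 0, 0, 0, 0) := by constructor <;> decide
  have hsim := pvR_foldl lp y row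
    (PySem.List.pyRange ((k : Int) + 1) (PySem.Str.len row) 1)
    (PySem.Dict.ofList [('|', 0), ('L', 0), ('J', 0), ('7', 0), ('F', 0)]) (0, 0, 0, 0, 0) h0
  have hcast : ((k : Int) + 1) = ((k + 1 : Nat) : Int) := by push_cast; ring
  have hfold := pvTFold_eq lp y row (row.toList.drop (k + 1)) (k + 1) rfl (0, 0, 0, 0, 0)
  rw [← hcast] at hfold
  rw [hfold, pvAdd_zero_left] at hsim
  obtain ⟨hv, _⟩ := hsim
  rcases hrs : pvRowScan lp y ((k : Int) + 1) (row.toList.drop (k + 1)) with ⟨⟨v, l, jj, s7, f⟩, t⟩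
  rw [hrs] at hv
  simp only [Prod.mk.injEq] at hv
  obtain ⟨h1, h2, h3, h4, h5⟩ := hv
  simp only [h1, h2, h3, h4, h5]

-- A's inner loop over a row from column k adds exactly pvRowScan's tile count
theorem row_fold_eq (lp : List (Int × Int)) (y : Int) (row : String) :
    ∀ (cs : List Char) (k : Nat), row.toList.drop k = cs → ∀ (acc : Int),
    (PySem.List.pyRange (k : Int) (PySem.Str.len row) 1).foldl (fun tiles j =>
        if (j, y) ∈ lp then tiles
        else tiles + PySem.Int.mod (check_crosses_to_the_right lp (j, y) row) 2) acc
      = acc + (pvRowScan lp y (k : Int) cs).2 := by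
  intro cs
  induction cs with
  | nil =>
    intro k hk acc
    have hlen : row.toList.length ≤ k := List.drop_eq_nil_iff.mp hk
    have hlen2 : row.length ≤ k := by simpa using hlen
    rw [PySem.List.pyRange_one_eq_nil (by simp [PySem.Str.len_eq]; omega)]
    simp [pvRowScan]
  | cons c rest ih =>
    intro k hk acc
    have hklt : k < row.toList.length := by
      by_contra hge
      rw [List.drop_eq_nil_of_le (by omega)] at hk; cases hk
    have hklt2 : k < row.length := by simpa using hklt
    have hrest : row.toList.drop (k + 1) = rest := by
      have h1 : (row.toList.drop k).tail = row.toList.drop (k + 1) := by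
        rw [← List.drop_drop]; simp
      rw [← h1, hk]; rfl
    rw [PySem.List.pyRange_one_cons (by simp [PySem.Str.len_eq]; omega)]
    rw [List.foldl_cons]
    have hcast : ((k : Int) + 1) = ((k + 1 : Nat) : Int) := by push_cast; ring
    have hchk := check_spec lp y row k
    rw [hrest] at hchk
    rcases hrs : pvRowScan lp y ((k + 1 : Nat) : Int) rest with ⟨⟨v, l, jj, s7, f⟩, t⟩
    rw [← hcast] at hrs
    rw [hrs] at hchk
    simp only [pvRowScan, hrs]
    rw [hcast, ih (k + 1) hrest]
    by_cases hm : ((k : Int), y) ∈ lp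
    · simp only [hm, if_true]
      rw [← hcast, hrs]
    · simp only [hm, if_false]
      rw [← hcast, hrs, hchk]
      ring

-- ===== VERDICT (by name: the statement is the Claim_ definition above) =====
theorem find_enclosed_tiles_spec : Claim_equal_find_enclosed_tiles := by
  intro lp pipeline _
  unfold Spec_find_enclosed_tiles find_enclosed_tiles find_enclosed_tiles_alt
  rw [PySem.List.enumerate_eq_map_pyRange pipeline ""]
  simp only [PySem.List.len_eq]
  rw [List.foldl_map]
  apply PySem.List.foldl_congr_mem
  intro acc i hi
  have h0 : ((0 : Nat) : Int) = (0 : Int) := by norm_num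
  have := row_fold_eq lp i (PySem.List.pyGetD pipeline i "")
    (PySem.List.pyGetD pipeline i "").toList 0 (by simp) acc
  rw [h0] at this
  simpa using this
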